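-- pv_equiv track=rewrite | github.com/vunguyenq/adventofcode2019 | 04.SecureContainer.py | check_valid_pwd
-- ===== SOURCE A (Python) =====
-- def check_valid_pwd(num):
--     digits = list(map(int,str(num)))
--     contain_adjacent = False
--     for i in range(1,len(digits)):
--         if digits[i] < digits[i-1]:
--             return False
--         if digits[i] == digits[i-1]:
--             contain_adjacent = True
--     return contain_adjacent
-- ===== SOURCE B (Python) =====
-- def check_valid_pwd(num):
--     digits = list(map(int, str(num)))
--     return digits == sorted(digits) and any(a == b for a, b in zip(digits, digits[1:]))
-- ===== Notes on version B (the rewrite author's own statement) =====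
-- stated objective: simpler
-- what changed: A's single early-return loop that checks monotonicity and adjacency together is replaced by a sort-and-compare (digits == sorted(digits)) for the non-decreasing test plus a separate zip-based any() for the adjacent-equal test.
import Mathlib
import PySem

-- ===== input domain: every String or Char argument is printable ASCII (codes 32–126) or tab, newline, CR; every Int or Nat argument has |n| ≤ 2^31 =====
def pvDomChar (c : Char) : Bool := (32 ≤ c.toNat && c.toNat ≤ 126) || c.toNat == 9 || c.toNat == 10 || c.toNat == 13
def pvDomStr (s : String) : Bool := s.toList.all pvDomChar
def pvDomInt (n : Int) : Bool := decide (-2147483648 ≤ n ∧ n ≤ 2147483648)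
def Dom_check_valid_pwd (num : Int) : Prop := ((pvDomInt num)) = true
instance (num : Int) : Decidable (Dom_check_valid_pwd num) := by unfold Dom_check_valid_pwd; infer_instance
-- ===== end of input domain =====

-- B replaces A's single early-return monotonicity+adjacency scan by a sort-and-compare
-- order test plus a separate zip-based adjacency test (objective: simpler).


-- ===== PORT A =====
-- the for-loop with its two-way early return; acc is contain_adjacent
def pvLoopA (digits : List Int) : List Int → Bool → Bool
  | [], acc => acc
  | i :: rest, acc =>
    if PySem.List.pyGetD digits i 0 < PySem.List.pyGetD digits (i - 1) 0 then false
    else pvLoopA digits rest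
      (if PySem.List.pyGetD digits i 0 = PySem.List.pyGetD digits (i - 1) 0 then true else acc)

-- list(map(int, str(num))); int(c) via PySem.Int.ofChars? (a digit char under Pre_, so getD 0 never fires there)
def pvDigits (num : Int) : List Int :=
  (PySem.Int.toChars num).map (fun c => (PySem.Int.ofChars? [c]).getD 0)

def check_valid_pwd (num : Int) : Bool :=
  let digits := pvDigits num
  pvLoopA digits (PySem.List.pyRange 1 digits.length 1) false

-- ===== PORT B =====
def check_valid_pwd_alt (num : Int) : Bool :=
  let digits := pvDigits num
  decide (digits = PySem.List.sorted digits (fun x => x) false) &&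
    (digits.zip (PySem.List.slice digits (some 1) none)).any (fun p => p.1 == p.2)

-- ===== PRECONDITION & SPEC =====
-- Pre_ excludes negative num, where str(num) starts with a minus sign and both A and B raise ValueError in int().
def Pre_check_valid_pwd (num : Int) : Prop := 0 ≤ num
instance (num : Int) : Decidable (Pre_check_valid_pwd num) := by unfold Pre_check_valid_pwd; infer_instance
def pvWitness_check_valid_pwd : Int := (111)

def Spec_check_valid_pwd (num : Int) (out : Bool) : Prop := out = check_valid_pwd_alt num
instance (num : Int) (out : Bool) : Decidable (Spec_check_valid_pwd num out) := by unfold Spec_check_valid_pwd; infer_instance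

-- ===== CLAIM (what is proved, stated in full; the proofs are below) =====
def Claim_equal_check_valid_pwd : Prop := ∀ (num : Int), Dom_check_valid_pwd num → Pre_check_valid_pwd num → Spec_check_valid_pwd num (check_valid_pwd num)

-- ===== LEMMAS AND PROOFS =====

-- A's loop recast on the list of adjacent pairs
def pvPairLoop : List (Int × Int) → Bool → Bool
  | [], acc => acc
  | (a, b) :: ps, acc =>
    if b < a then false else pvPairLoop ps (if b = a then true else acc)

theorem pvPairLoop_spec (ps : List (Int × Int)) (acc : Bool) :
    pvPairLoop ps acc =
      (ps.all (fun p => decide (p.1 ≤ p.2)) && (acc || ps.any (fun p => p.2 == p.1))) := by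
  induction ps generalizing acc with
  | nil => simp [pvPairLoop]
  | cons p ps ih =>
    obtain ⟨a, b⟩ := p
    simp only [pvPairLoop, List.all_cons, List.any_cons]
    by_cases hlt : b < a
    · simp [hlt, show ¬ (a ≤ b) by omega]
    · rw [ih]
      by_cases heq : b = a
      · simp [heq]
      · simp only [if_neg hlt, if_neg heq]
        have hba : (b == a) = false := by simp [heq]
        have hab : (decide (a ≤ b)) = true := by simp; omega
        simp [hba, hab]

theorem pvLoopA_bridge (suf : List Int) : ∀ (pre : List Int) (a : Int) (acc : Bool),
    pvLoopA (pre ++ a :: suf)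
      (PySem.List.pyRange ((pre.length : Int) + 1) ((pre ++ a :: suf).length : Int) 1) acc
    = pvPairLoop ((a :: suf).zip suf) acc := by
  induction suf with
  | nil =>
    intro pre a acc
    rw [PySem.List.pyRange_one_eq_nil (by simp)]
    simp [pvLoopA, pvPairLoop]
  | cons b rest ih =>
    intro pre a acc
    have hlen : ((pre ++ a :: b :: rest).length : Int) = (pre.length : Int) + 2 + rest.length := by
      simp; omega
    rw [PySem.List.pyRange_one_cons (by omega : (pre.length : Int) + 1 < ((pre ++ a :: b :: rest).length : Int))]
    have hgi : PySem.List.pyGetD (pre ++ a :: b :: rest) ((pre.length : Int) + 1) 0 = b := by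
      have : ((pre.length : Int) + 1) = ((pre.length + 1 : Nat) : Int) := by push_cast; ring
      rw [this, PySem.List.pyGetD_natCast]
      simp [List.getD]
    have hgp : PySem.List.pyGetD (pre ++ a :: b :: rest) ((pre.length : Int) + 1 - 1) 0 = a := by
      have : ((pre.length : Int) + 1 - 1) = ((pre.length : Nat) : Int) := by ring
      rw [this, PySem.List.pyGetD_natCast]
      simp [List.getD]
    simp only [pvLoopA, hgi, hgp]
    have hre := ih (pre ++ [a]) b
    simp only [List.append_assoc, List.singleton_append, List.length_append,
      List.length_singleton, Nat.cast_add, Nat.cast_one] at hre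
    simp only [List.length_append, Nat.cast_add]
    rw [show ((a :: b :: rest).zip (b :: rest)) = (a, b) :: ((b :: rest).zip rest) from by simp,
      pvPairLoop]
    by_cases hlt : b < a
    · simp [hlt]
    · rw [if_neg hlt, if_neg hlt, hre]

theorem pvZipAll_pairwise (ds : List Int) :
    (ds.zip ds.tail).all (fun p => decide (p.1 ≤ p.2)) = true ↔ ds.Pairwise (· ≤ ·) := by
  rw [← List.isChain_iff_pairwise]
  induction ds with
  | nil => simp
  | cons a t ih =>
    cases t with
    | nil => simp
    | cons b r =>
      simp only [List.tail_cons, List.zip_cons_cons, List.all_cons,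
        List.isChain_cons_cons, Bool.and_eq_true, decide_eq_true_eq]
      rw [← ih]
      simp

theorem pvSorted_eq_iff (ds : List Int) :
    (ds = PySem.List.sorted ds (fun x => x) false) ↔ ds.Pairwise (· ≤ ·) := by
  constructor
  · intro h
    have := PySem.List.sorted_pairwise ds (fun x => x)
    rw [← h] at this
    exact this
  · intro h
    exact (PySem.List.sorted_eq_self_of_pairwise ds (fun x => x) h).symm

theorem pvMain (ds : List Int) :
    pvLoopA ds (PySem.List.pyRange 1 (ds.length : Int) 1) false
    = (decide (ds = PySem.List.sorted ds (fun x => x) false) &&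
        (ds.zip (PySem.List.slice ds (some 1) none)).any (fun p => p.1 == p.2)) := by
  rw [PySem.List.slice_from_one]
  cases ds with
  | nil => simp [pvLoopA, PySem.List.pyRange_one_eq_nil, PySem.List.sorted]
  | cons a t =>
    have hb := pvLoopA_bridge t [] a false
    simp only [List.nil_append, List.length_nil, Nat.cast_zero, zero_add,
      List.length_cons] at hb
    simp only [List.length_cons, List.tail_cons]
    rw [hb, pvPairLoop_spec]
    have hall : ((a :: t).zip t).all (fun p => decide (p.1 ≤ p.2))
        = decide ((a :: t) = PySem.List.sorted (a :: t) (fun x => x) false) := by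
      rw [Bool.eq_iff_iff, decide_eq_true_iff]
      rw [show ((a :: t).zip t) = ((a :: t).zip (a :: t).tail) from rfl]
      rw [pvZipAll_pairwise, pvSorted_eq_iff]
    rw [hall, Bool.false_or,
      show (((a :: t).zip t).any fun p => p.2 == p.1) = (((a :: t).zip t).any fun p => p.1 == p.2)
        from congrArg (List.any ((a :: t).zip t)) (funext fun p => Bool.beq_comm)]

-- ===== VERDICT (by name: the statement is the Claim_ definition above) =====
theorem check_valid_pwd_spec : Claim_equal_check_valid_pwd := by
  intro num _ _
  unfold Spec_check_valid_pwd check_valid_pwd check_valid_pwd_alt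
  exact pvMain (pvDigits num)
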